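-- pv_equiv track=rewrite | github.com/laonahongchen/Bilevel-Optimization-in-Coordination-Game | bilevel_pg/bilevelpg/environment/utils.py | encode_policy
-- ===== SOURCE A (Python) =====
-- def encode_policy(a_policy, b_policy, num_action = 2):
-- 	result = 0
-- 	for i in range(len(a_policy) - 1, -1, -1):
-- 		result *= num_action
-- 		result += a_policy[i]
-- 	for i in range(len(b_policy) - 1, -1, -1):
-- 		result *= num_action
-- 		result += b_policy[i]
-- 	return result
-- ===== SOURCE B (Python) =====
-- def encode_policy(a_policy, b_policy, num_action = 2):
--     result = 0
--     p = 1
--     for x in b_policy: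
--         result += x * p
--         p *= num_action
--     for x in a_policy:
--         result += x * p
--         p *= num_action
--     return result
-- ===== Notes on version B (the rewrite author's own statement) =====
-- stated objective: alternative
-- what changed: Replaces the two backward Horner (multiply-accumulate) loops with two forward passes that maintain an explicit running place-value multiplier, adding b_policy as the low digits and a_policy as the high digits.
import Mathlib
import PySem

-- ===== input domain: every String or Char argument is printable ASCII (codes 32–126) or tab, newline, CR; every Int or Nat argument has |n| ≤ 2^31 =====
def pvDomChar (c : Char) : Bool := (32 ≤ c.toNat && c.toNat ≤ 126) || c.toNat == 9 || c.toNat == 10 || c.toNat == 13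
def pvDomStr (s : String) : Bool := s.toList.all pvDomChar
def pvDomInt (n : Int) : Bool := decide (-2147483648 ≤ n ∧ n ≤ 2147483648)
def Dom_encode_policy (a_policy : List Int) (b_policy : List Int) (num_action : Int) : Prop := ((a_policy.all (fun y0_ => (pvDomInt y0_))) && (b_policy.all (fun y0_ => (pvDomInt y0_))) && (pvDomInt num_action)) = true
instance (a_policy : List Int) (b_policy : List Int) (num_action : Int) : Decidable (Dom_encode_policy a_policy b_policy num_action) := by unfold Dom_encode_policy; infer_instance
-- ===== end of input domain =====

-- B replaces A's two backward Horner multiply-accumulate loops with two forward passes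
-- carrying an explicit running place-value multiplier (objective: alternative decomposition).

-- ===== PORT A =====
-- A's loops visit indices len-1, len-2, …, 0, i.e. the list reversed; each step does result = result*num_action + element.
def encode_policy (a_policy : List Int) (b_policy : List Int) (num_action : Int) : Int :=
  let result := a_policy.reverse.foldl (fun result x => result * num_action + x) 0
  b_policy.reverse.foldl (fun result x => result * num_action + x) result

-- ===== PORT B =====
-- forward pass: state is (result, p); result += x*p, p *= num_action
def encode_policy_alt (a_policy : List Int) (b_policy : List Int) (num_action : Int) : Int :=
  let step : Int × Int → Int → Int × Int := fun rp x => (rp.1 + x * rp.2, rp.2 * num_action)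
  let rp := b_policy.foldl step (0, 1)
  (a_policy.foldl step rp).1

-- ===== PRECONDITION & SPEC =====
def Spec_encode_policy (a_policy : List Int) (b_policy : List Int) (num_action : Int) (out : Int) : Prop := out = encode_policy_alt a_policy b_policy num_action
instance (a_policy : List Int) (b_policy : List Int) (num_action : Int) (out : Int) : Decidable (Spec_encode_policy a_policy b_policy num_action out) := by unfold Spec_encode_policy; infer_instance

-- ===== CLAIM (what is proved, stated in full; the proofs are below) =====
def Claim_equal_encode_policy : Prop := ∀ (a_policy : List Int) (b_policy : List Int) (num_action : Int), Dom_encode_policy a_policy b_policy num_action → Spec_encode_policy a_policy b_policy num_action (encode_policy a_policy b_policy num_action)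

-- ===== LEMMAS AND PROOFS =====

-- the common mathematical value: the base-n evaluation with l[0] as lowest digit
def pvVal (n : Int) (l : List Int) : Int := l.foldr (fun x acc => x + n * acc) 0

theorem horner_rev (n : Int) : ∀ (l : List Int) (r : Int),
    l.reverse.foldl (fun result x => result * n + x) r = r * n ^ l.length + pvVal n l := by
  intro l
  induction l with
  | nil => intro r; simp [pvVal]
  | cons x t ih =>
      intro r
      simp only [List.reverse_cons, List.foldl_append, List.foldl_cons, List.foldl_nil, ih,
        List.length_cons, pvVal, List.foldr_cons]
      show (r * n ^ t.length + pvVal n t) * n + x = r * n ^ (t.length + 1) + (x + n * pvVal n t)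
      ring

theorem fwd_fold (n : Int) : ∀ (l : List Int) (r p : Int),
    l.foldl (fun rp x => (rp.1 + x * rp.2, rp.2 * n)) (r, p)
      = (r + p * pvVal n l, p * n ^ l.length) := by
  intro l
  induction l with
  | nil => intro r p; simp [pvVal]
  | cons x t ih =>
      intro r p
      simp only [List.foldl_cons, ih, List.length_cons, pvVal, List.foldr_cons]
      refine Prod.ext ?_ ?_
      · show r + x * p + p * n * pvVal n t = r + p * (x + n * pvVal n t); ring
      · show p * n * n ^ t.length = p * n ^ (t.length + 1); ring

-- ===== VERDICT (by name: the statement is the Claim_ definition above) =====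
theorem encode_policy_spec : Claim_equal_encode_policy := by
  intro a b n _
  show encode_policy a b n = encode_policy_alt a b n
  simp only [encode_policy, encode_policy_alt, horner_rev, fwd_fold]
  ring
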